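-- pv_equiv track=rewrite | github.com/vaikmarko/Sentimentalapp | fix_reflection_order.py | reorder_created_formats
-- ===== SOURCE A (Python) =====
-- def reorder_created_formats(created_formats_list):
--     """Reorder formats to put reflection first among therapeutic formats"""
--     if not created_formats_list or 'reflection' not in created_formats_list:
--         return created_formats_list
--
--     # Define therapeutic formats
--     therapeutic_formats = ['reflection', 'insights', 'growth_summary', 'journal_entry']
--
--     # Separate formats
--     therapeutic_in_story = [f for f in created_formats_list if f in therapeutic_formats]
--     non_therapeutic = [f for f in created_formats_list if f not in therapeutic_formats]
--
--     # Sort therapeutic formats with reflection first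
--     therapeutic_sorted = sorted(therapeutic_in_story,
--                               key=lambda x: 0 if x == 'reflection' else therapeutic_formats.index(x))
--
--     # Rebuild the list: non-therapeutic first, then therapeutic with reflection first
--     return non_therapeutic + therapeutic_sorted
-- ===== SOURCE B (Python) =====
-- def reorder_created_formats(created_formats_list):
--     """Reorder formats to put reflection first among therapeutic formats"""
--     if not created_formats_list or 'reflection' not in created_formats_list:
--         return created_formats_list
--
--     canonical = ['reflection', 'insights', 'growth_summary', 'journal_entry']
--
--     # Non-therapeutic entries keep their original order; then gather the
--     # therapeutic entries bucket by bucket in the canonical order (no sort).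
--     out = [f for f in created_formats_list if f not in canonical]
--     for fmt in canonical:
--         out += [f for f in created_formats_list if f == fmt]
--     return out
-- ===== Notes on version B (the rewrite author's own statement) =====
-- stated objective: alternative
-- what changed: Replaces the key-based stable sort of the therapeutic entries by a direct order-driven gather: iterate the canonical format order and collect all matching entries for each, so no sort and no key function is needed.
import Mathlib
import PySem

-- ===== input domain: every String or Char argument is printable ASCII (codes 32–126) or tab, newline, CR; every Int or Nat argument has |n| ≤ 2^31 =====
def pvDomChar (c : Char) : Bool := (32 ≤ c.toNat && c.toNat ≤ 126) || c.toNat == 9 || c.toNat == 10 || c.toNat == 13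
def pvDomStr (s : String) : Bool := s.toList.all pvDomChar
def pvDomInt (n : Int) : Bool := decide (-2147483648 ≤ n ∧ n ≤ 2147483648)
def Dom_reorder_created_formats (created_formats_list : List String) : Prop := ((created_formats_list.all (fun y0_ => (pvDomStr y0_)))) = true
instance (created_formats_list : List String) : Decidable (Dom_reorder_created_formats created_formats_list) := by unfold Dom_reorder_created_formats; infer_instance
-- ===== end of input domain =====

-- B replaces A's key-based stable sort of the therapeutic entries by an order-driven
-- gather over the canonical format order (alternative decomposition, same results).


-- ===== PORT A =====
-- therapeutic_formats, a module-level-like constant of A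
def pvTF : List String := ["reflection", "insights", "growth_summary", "journal_entry"]

-- A's sort key: 0 if x == 'reflection' else therapeutic_formats.index(x).
-- Python's .index raises ValueError for a non-member; A only applies the key to
-- members of therapeutic_formats, so the `.getD 0` default is never reached.
def pvKeyA (x : String) : Int :=
  if x == "reflection" then 0 else (((PySem.List.index? pvTF x).getD 0 : Nat) : Int)

def reorder_created_formats (created_formats_list : List String) : List String :=
  if created_formats_list = [] ∨ ¬ created_formats_list.contains "reflection" then
    created_formats_list
  else
    let therapeutic_in_story := created_formats_list.filter (fun f => pvTF.contains f)
    let non_therapeutic := created_formats_list.filter (fun f => !(pvTF.contains f))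
    let therapeutic_sorted := PySem.List.sorted therapeutic_in_story pvKeyA
    non_therapeutic ++ therapeutic_sorted

-- ===== PORT B =====
def reorder_created_formats_alt (created_formats_list : List String) : List String :=
  if created_formats_list = [] ∨ ¬ created_formats_list.contains "reflection" then
    created_formats_list
  else
    let canonical : List String := ["reflection", "insights", "growth_summary", "journal_entry"]
    -- out = non-therapeutic entries; then for fmt in canonical: out += matching entries
    canonical.foldl (fun out fmt => out ++ created_formats_list.filter (fun f => f == fmt))
      (created_formats_list.filter (fun f => !(canonical.contains f)))

-- ===== PRECONDITION & SPEC =====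
def Spec_reorder_created_formats (created_formats_list : List String) (out : List String) : Prop := out = reorder_created_formats_alt created_formats_list
instance (created_formats_list : List String) (out : List String) : Decidable (Spec_reorder_created_formats created_formats_list out) := by unfold Spec_reorder_created_formats; infer_instance

-- ===== CLAIM (what is proved, stated in full; the proofs are below) =====
def Claim_equal_reorder_created_formats : Prop := ∀ (created_formats_list : List String), Dom_reorder_created_formats created_formats_list → Spec_reorder_created_formats created_formats_list (reorder_created_formats created_formats_list)

-- ===== LEMMAS AND PROOFS =====

-- insertBy walks past a prefix it is never placed before
theorem pv_insertBy_skip (b : String → String → Bool) (x : String) (A B : List String)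
    (h : ∀ y ∈ A, b x y = false) :
    PySem.List.insertBy b x (A ++ B) = A ++ PySem.List.insertBy b x B := by
  induction A with
  | nil => simp
  | cons a t ih =>
    have ha : b x a = false := h a (by simp)
    simp only [List.cons_append, PySem.List.insertBy, ha, Bool.false_eq_true, if_false]
    exact congrArg (a :: ·) (ih (fun y hy => h y (by simp [hy])))

-- insertBy places x in front when it goes before every element
theorem pv_insertBy_front (b : String → String → Bool) (x : String) (B : List String)
    (h : ∀ y ∈ B, b x y = true) :
    PySem.List.insertBy b x B = x :: B := by
  cases B with
  | nil => rfl
  | cons a t => simp [PySem.List.insertBy, h a (by simp)]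

-- key values on the four therapeutic formats
theorem pvKeyA_r : pvKeyA "reflection" = 0 := by decide
theorem pvKeyA_i : pvKeyA "insights" = 1 := by decide
theorem pvKeyA_g : pvKeyA "growth_summary" = 2 := by decide
theorem pvKeyA_j : pvKeyA "journal_entry" = 3 := by decide

-- A's stable sort of a list of therapeutic formats groups them in canonical order
theorem pv_sorted_canon (ys : List String)
    (h : ∀ y ∈ ys, y = "reflection" ∨ y = "insights" ∨ y = "growth_summary" ∨ y = "journal_entry") :
    PySem.List.sorted ys pvKeyA =
      List.replicate (ys.count "reflection") "reflection" ++
      List.replicate (ys.count "insights") "insights" ++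
      List.replicate (ys.count "growth_summary") "growth_summary" ++
      List.replicate (ys.count "journal_entry") "journal_entry" := by
  induction ys using List.reverseRecOn with
  | nil => simp [PySem.List.sorted]
  | append_singleton ys x ih =>
    have hstep : PySem.List.sorted (ys ++ [x]) pvKeyA =
        PySem.List.insertBy (fun a b => decide (pvKeyA a < pvKeyA b)) x
          (PySem.List.sorted ys pvKeyA) := by
      rw [PySem.List.sorted_eq_foldl_insertBy, PySem.List.sorted_eq_foldl_insertBy,
        List.foldl_append]
      rfl
    have hys : ∀ y ∈ ys, y = "reflection" ∨ y = "insights" ∨ y = "growth_summary" ∨ y = "journal_entry" :=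
      fun y hy => h y (by simp [hy])
    rw [hstep, ih hys]
    set b : String → String → Bool := fun a b => decide (pvKeyA a < pvKeyA b) with hb
    have hmem : ∀ y ∈ List.replicate (ys.count "reflection") "reflection" ++
        List.replicate (ys.count "insights") "insights" ++
        List.replicate (ys.count "growth_summary") "growth_summary" ++
        List.replicate (ys.count "journal_entry") "journal_entry",
        y = "reflection" ∨ y = "insights" ∨ y = "growth_summary" ∨ y = "journal_entry" := by
      intro y hy
      simp only [List.mem_append] at hy
      rcases hy with ((hy | hy) | hy) | hy <;>
        simp [List.eq_of_mem_replicate hy]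
    rcases h x (by simp) with hx | hx | hx | hx <;> subst hx
    · -- reflection: walks past its own bucket, then in front of the rest
      rw [List.append_assoc, List.append_assoc, pv_insertBy_skip, pv_insertBy_front]
      · simp [List.count_append, List.replicate_succ', List.append_assoc]
      · intro y hy
        simp only [List.mem_append] at hy
        rcases hy with hy | hy | hy <;>
          simp [hb, List.eq_of_mem_replicate hy, pvKeyA_r, pvKeyA_i, pvKeyA_g, pvKeyA_j]
      · intro y hy
        simp [hb, List.eq_of_mem_replicate hy, pvKeyA_r]
    · -- insights
      rw [List.append_assoc, pv_insertBy_skip, pv_insertBy_front]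
      · simp [List.count_append, List.replicate_succ']
      · intro y hy
        simp only [List.mem_append] at hy
        rcases hy with hy | hy <;>
          simp [hb, List.eq_of_mem_replicate hy, pvKeyA_i, pvKeyA_g, pvKeyA_j]
      · intro y hy
        simp only [List.mem_append] at hy
        rcases hy with hy | hy <;>
          simp [hb, List.eq_of_mem_replicate hy, pvKeyA_r, pvKeyA_i]
    · -- growth_summary
      rw [pv_insertBy_skip, pv_insertBy_front]
      · simp [List.count_append, List.replicate_succ']
      · intro y hy
        simp [hb, List.eq_of_mem_replicate hy, pvKeyA_g, pvKeyA_j]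
      · intro y hy
        simp only [List.mem_append] at hy
        rcases hy with (hy | hy) | hy <;>
          simp [hb, List.eq_of_mem_replicate hy, pvKeyA_r, pvKeyA_i, pvKeyA_g]
    · -- journal_entry: appended at the very end
      rw [PySem.List.insertBy_of_forall_not_before]
      · simp [List.count_append, List.replicate_succ']
      · intro y hy
        rcases hmem y hy with hy' | hy' | hy' | hy' <;>
          simp [hb, hy', pvKeyA_r, pvKeyA_i, pvKeyA_g, pvKeyA_j]

-- ===== VERDICT (by name: the statement is the Claim_ definition above) =====
theorem reorder_created_formats_spec : Claim_equal_reorder_created_formats := by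
  intro l _
  unfold Spec_reorder_created_formats reorder_created_formats reorder_created_formats_alt
  by_cases hg : l = [] ∨ ¬ l.contains "reflection"
  · rw [if_pos hg, if_pos hg]
  · simp only [hg, if_false]
    rw [PySem.List.foldl_append_eq_flatMap]
    have hther : ∀ y ∈ l.filter (fun f => pvTF.contains f),
        y = "reflection" ∨ y = "insights" ∨ y = "growth_summary" ∨ y = "journal_entry" := by
      intro y hy
      have := List.of_mem_filter hy
      simpa [pvTF] using this
    have hcount : ∀ c : String, pvTF.contains c = true →
        (l.filter (fun f => pvTF.contains f)).count c = l.count c := by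
      intro c hc
      exact List.count_filter hc
    rw [pv_sorted_canon _ hther,
      hcount "reflection" (by decide), hcount "insights" (by decide),
      hcount "growth_summary" (by decide), hcount "journal_entry" (by decide)]
    simp [pvTF, List.flatMap_cons, List.filter_beq]
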